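-- pv_equiv track=rewrite | github.com/gitschatz/marcxml-match-filter | match_filter.py | diff_index_records
-- ===== SOURCE A (Python) =====
-- def diff_index_records(index, scn_collection):
-- 	# records with a 028 that match entry in index list
-- 	matching_record_ids = []  # type: List[str]
--
-- 	# @todo list of dict comprehension
-- 	for dic in scn_collection:
-- 		for key, val in dic.items():
-- 			if val.strip() in index:
-- 				matching_record_ids.append(str(key))
--
-- 	matching_whitelist_uniq = list(dict.fromkeys(matching_record_ids))
-- 	# Subtract the whitelisted matching records from the record ids in collection, left with unmatched record ids
-- 	return list(set([str(*d.keys()) for d in scn_collection]) - set(matching_whitelist_uniq))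
-- ===== SOURCE B (Python) =====
-- def diff_index_records(index, scn_collection):
--     idx = set(index)
--     table = {}
--     for d in scn_collection:
--         rec_id = str(*d.keys())
--         hit = any(v.strip() in idx for v in d.values())
--         table[rec_id] = table.get(rec_id, False) or hit
--     return [rec_id for rec_id, matched in table.items() if not matched]
-- ===== Notes on version B (the rewrite author's own statement) =====
-- stated objective: faster
-- what changed: A builds a whitelist of matching keys (testing each value against the index LIST), dedups it and returns a set difference against the record-id set; B makes one pass over scn_collection, OR-accumulating a matched flag per record id in a dict with the index held in a set, and emits the unmatched ids (output order compared as a set, since A's list(set-set) order is hash-arbitrary).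
import Mathlib
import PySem

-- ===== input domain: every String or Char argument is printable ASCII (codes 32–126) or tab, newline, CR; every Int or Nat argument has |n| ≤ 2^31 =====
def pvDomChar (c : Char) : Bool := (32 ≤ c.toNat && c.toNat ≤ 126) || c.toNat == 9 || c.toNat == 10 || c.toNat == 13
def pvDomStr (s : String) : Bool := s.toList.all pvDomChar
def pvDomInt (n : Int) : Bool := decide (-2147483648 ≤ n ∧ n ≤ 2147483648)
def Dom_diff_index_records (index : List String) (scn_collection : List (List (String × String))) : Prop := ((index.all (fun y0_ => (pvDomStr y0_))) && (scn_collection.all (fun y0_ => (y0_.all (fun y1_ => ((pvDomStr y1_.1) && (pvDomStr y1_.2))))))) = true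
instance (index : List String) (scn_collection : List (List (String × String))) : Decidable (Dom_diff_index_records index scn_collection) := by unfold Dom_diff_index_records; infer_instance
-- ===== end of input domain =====

-- B replaces A's whitelist list + dedup + set difference by one flag-accumulating dict pass with the index in a set (objective: faster, measured).
-- Both Pythons return a list whose element ORDER A leaves to set hash-order; the result is compared as a set of
-- record ids, and both Lean ports produce it in first-occurrence order.

-- ===== PORT A =====
-- str(*d.keys()): the single key of a one-key dict, "" for an empty dict (TypeError for ≥ 2 keys — excluded by Pre_)
def pvRecId (d : List (String × String)) : String :=
  match d with
  | [(k, _)] => k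
  | _ => ""

def diff_index_records (index : List String) (scn_collection : List (List (String × String))) : List String :=
  -- for dic in scn_collection: for key, val in dic.items(): if val.strip() in index: append(str(key))
  let matching_record_ids : List String :=
    scn_collection.foldl (fun acc dic =>
      dic.foldl (fun acc2 kv =>
        if index.contains (PySem.Str.strip kv.2) then acc2 ++ [kv.1] else acc2) acc) []
  -- list(dict.fromkeys(…))
  let matching_whitelist_uniq := PySem.List.dedup matching_record_ids
  -- list(set([str(*d.keys()) for d in scn_collection]) - set(matching_whitelist_uniq))
  PySem.Set.diff (PySem.Set.ofList (scn_collection.map pvRecId))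
    (PySem.Set.ofList matching_whitelist_uniq)

-- ===== PORT B =====
def diff_index_records_alt (index : List String) (scn_collection : List (List (String × String))) : List String :=
  let idx : PySem.Set String := PySem.Set.ofList index
  let table : PySem.Dict String Bool :=
    scn_collection.foldl (fun t d =>
      let rec_id := pvRecId d
      let hit := d.any (fun kv => PySem.Set.contains idx (PySem.Str.strip kv.2))
      t.insert rec_id (t.getD rec_id false || hit)) PySem.Dict.empty
  (table.items.filter (fun p => !p.2)).map Prod.fst

-- ===== PRECONDITION & SPEC =====
-- A raises TypeError (str(*d.keys()) with two or more arguments) on any dict of more than one entry; Pre_ keeps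
-- exactly the inputs (every dict has at most one entry) on which Python A returns.
def Pre_diff_index_records (index : List String) (scn_collection : List (List (String × String))) : Prop :=
  ∀ d ∈ scn_collection, d.length ≤ 1
instance (index : List String) (scn_collection : List (List (String × String))) : Decidable (Pre_diff_index_records index scn_collection) := by unfold Pre_diff_index_records; infer_instance

def pvWitness_diff_index_records : List String × (List (List (String × String))) :=
  (["a", "b"], [[("r1", " a ")], [("r2", "z")], [], [("r1", "q")]])

def Spec_diff_index_records (index : List String) (scn_collection : List (List (String × String))) (out : List String) : Prop := out = diff_index_records_alt index scn_collection
instance (index : List String) (scn_collection : List (List (String × String))) (out : List String) : Decidable (Spec_diff_index_records index scn_collection out) := by unfold Spec_diff_index_records; infer_instance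

-- ===== CLAIM (what is proved, stated in full; the proofs are below) =====
def Claim_equal_diff_index_records : Prop := ∀ (index : List String) (scn_collection : List (List (String × String))), Dom_diff_index_records index scn_collection → Pre_diff_index_records index scn_collection → Spec_diff_index_records index scn_collection (diff_index_records index scn_collection)

-- ===== LEMMAS AND PROOFS =====

-- the matched flag B accumulates (definitionally the `hit` of B's loop body)
def pvHit (index : List String) (d : List (String × String)) : Bool :=
  d.any (fun kv => (PySem.Set.ofList index).contains (PySem.Str.strip kv.2))

lemma pv_contains_ofList (index : List String) (v : String) :
    (PySem.Set.ofList index).contains v = index.contains v := by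
  simp [PySem.Set.contains_eq_listContains, Bool.eq_iff_iff, PySem.Set.mem_ofList]

-- a one-entry dict contributes its key to A's matching list exactly when B's flag for it is set
lemma pv_dic_bridge (index : List String) (d : List (String × String)) (r : String)
    (hd : d.length ≤ 1) :
    (r ∈ (d.filter (fun kv => index.contains (PySem.Str.strip kv.2))).map Prod.fst)
      ↔ (pvRecId d == r && pvHit index d) = true := by
  match d with
  | [] => simp [pvRecId, pvHit]
  | [(k, v)] =>
      simp only [pvRecId, pvHit, List.any_cons, List.any_nil, Bool.or_false,
        pv_contains_ofList, List.filter_cons, List.filter_nil]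
      cases h : index.contains (PySem.Str.strip v)
      · simp [h]
      · simp only [h, if_true, Bool.and_true, List.map_cons, List.map_nil,
          List.mem_singleton, beq_iff_eq]
        exact eq_comm
  | _ :: _ :: _ => simp at hd

-- membership in A's matching_record_ids list = B's any-hit condition
lemma pv_matching_mem (index : List String) (l : List (List (String × String)))
    (acc : List String) (r : String) (hpre : ∀ d ∈ l, d.length ≤ 1) :
    (r ∈ l.foldl (fun acc dic =>
        dic.foldl (fun acc2 kv =>
          if index.contains (PySem.Str.strip kv.2) then acc2 ++ [kv.1] else acc2) acc) acc)
      ↔ (r ∈ acc ∨ l.any (fun d => pvRecId d == r && pvHit index d) = true) := by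
  induction l generalizing acc with
  | nil => simp
  | cons d l ih =>
      simp only [List.foldl_cons, List.any_cons]
      rw [ih _ (fun d hd => hpre d (List.mem_cons_of_mem _ hd)),
        PySem.List.foldl_append_if]
      rw [List.mem_append, pv_dic_bridge index d r (hpre d (List.mem_cons_self ..))]
      simp only [Bool.or_eq_true]
      tauto

-- the flag B's table holds for r after the whole pass
lemma pv_getD_table (index : List String) (l : List (List (String × String)))
    (t : PySem.Dict String Bool) (r : String) :
    (l.foldl (fun t d => t.insert (pvRecId d) (t.getD (pvRecId d) false || pvHit index d)) t).getD r false
      = (t.getD r false || l.any (fun d => pvRecId d == r && pvHit index d)) := by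
  induction l generalizing t with
  | nil => simp
  | cons d l ih =>
      simp only [List.foldl_cons, List.any_cons, ih]
      rw [PySem.Dict.getD_insert]
      by_cases h : r = pvRecId d
      · subst h; simp [Bool.or_assoc]
      · have hb : (pvRecId d == r) = false := beq_eq_false_iff_ne.mpr (fun hh => h hh.symm)
        simp [h, hb]

theorem pv_main (index : List String) (scn : List (List (String × String)))
    (hpre : ∀ d ∈ scn, d.length ≤ 1) :
    diff_index_records index scn = diff_index_records_alt index scn := by
  unfold diff_index_records diff_index_records_alt
  show PySem.Set.diff _ _ =
    ((scn.foldl (fun t d => t.insert (pvRecId d) (t.getD (pvRecId d) false || pvHit index d))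
        PySem.Dict.empty).items.filter (fun p => !p.2)).map Prod.fst
  have hnd : (scn.foldl (fun t d =>
      t.insert (pvRecId d) (t.getD (pvRecId d) false || pvHit index d))
      PySem.Dict.empty).keys.Nodup :=
    PySem.Dict.nodup_keys_foldl_insert_key scn pvRecId _ _ PySem.Dict.nodup_keys_empty
  rw [PySem.Dict.items_eq_map_keys _ hnd false, List.filter_map, List.map_map,
    PySem.Dict.keys_foldl_insert_key]
  have hkeys : PySem.Set.update (PySem.Dict.keys (PySem.Dict.empty (κ := String) (ν := Bool)))
      (scn.map pvRecId) = PySem.Set.ofList (scn.map pvRecId) := by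
    simp [PySem.Dict.keys_empty, PySem.Set.update_nil_left]
  rw [hkeys]
  show ((PySem.Set.ofList (scn.map pvRecId)).filter
      (fun x => !(PySem.Set.contains (PySem.Set.ofList
        (PySem.List.dedup (scn.foldl (fun acc dic => dic.foldl (fun acc2 kv =>
          if index.contains (PySem.Str.strip kv.2) then acc2 ++ [kv.1] else acc2) acc) []))) x))) = _
  rw [show (Prod.fst ∘ fun k => (k, (scn.foldl (fun t d =>
      t.insert (pvRecId d) (t.getD (pvRecId d) false || pvHit index d))
      PySem.Dict.empty).getD k false)) = id from rfl, List.map_id]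
  apply List.filter_congr
  intro x _hx
  have hg := pv_getD_table index scn PySem.Dict.empty x
  simp only [PySem.Dict.getD_empty, Bool.false_or] at hg
  simp only [Function.comp, hg]
  congr 1
  rw [PySem.Set.contains_eq_listContains, Bool.eq_iff_iff]
  rw [List.contains_iff_mem, PySem.Set.mem_ofList, PySem.List.mem_dedup,
    pv_matching_mem index scn [] x hpre]
  simp

-- ===== VERDICT (by name: the statement is the Claim_ definition above) =====
theorem diff_index_records_spec : Claim_equal_diff_index_records := by
  intro index scn _hdom hpre
  unfold Spec_diff_index_records
  exact pv_main index scn hpre
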